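-- pv_equiv track=rewrite | github.com/DuvanFelipeDeveloper/DamasMinMaxQ | MinMax.py | buscar_parejas_menor_valor
-- ===== SOURCE A (Python) =====
-- def buscar_parejas_menor_valor(vector):
--     parejas = []
--     diferencia_minima = float('-inf')
--     for pareja in vector:
--         diferencia = abs(pareja[0][0] - pareja[1][0])
--
--
--         if diferencia > diferencia_minima:
--             diferencia_minima = diferencia
--             parejas = [pareja]
--         elif diferencia == diferencia_minima:
--             parejas.append(pareja)
--     return parejas
-- ===== SOURCE B (Python) =====
-- def buscar_parejas_menor_valor(vector):
--     if not vector: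
--         return []
--     maxima = max(abs(p[0][0] - p[1][0]) for p in vector)
--     return [p for p in vector if abs(p[0][0] - p[1][0]) == maxima]
-- ===== Notes on version B (the rewrite author's own statement) =====
-- stated objective: simpler
-- what changed: Replaces A's single accumulate-and-reset loop (tracking the running maximum and rebuilding/appending to the result list) by two plain passes: a max-reduction to find the largest absolute difference, then a list comprehension selecting the pairs that attain it.
import Mathlib
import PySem

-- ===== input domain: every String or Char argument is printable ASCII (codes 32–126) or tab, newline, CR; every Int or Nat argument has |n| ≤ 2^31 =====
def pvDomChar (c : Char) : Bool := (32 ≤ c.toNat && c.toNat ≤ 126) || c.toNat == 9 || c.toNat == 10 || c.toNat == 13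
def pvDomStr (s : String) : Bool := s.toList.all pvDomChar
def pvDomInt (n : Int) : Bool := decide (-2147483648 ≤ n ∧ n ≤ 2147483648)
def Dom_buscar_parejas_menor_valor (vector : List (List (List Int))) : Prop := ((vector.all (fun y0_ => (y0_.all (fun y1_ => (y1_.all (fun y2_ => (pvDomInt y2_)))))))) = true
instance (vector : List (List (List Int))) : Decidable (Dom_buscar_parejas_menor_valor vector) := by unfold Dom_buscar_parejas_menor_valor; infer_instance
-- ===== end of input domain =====

-- ===== PORT A =====
-- B changes the decomposition: a max-reduction pass then a filter pass, instead of A's accumulate-and-reset loop.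
-- shared helper: abs(pareja[0][0] - pareja[1][0]); the .getD defaults are unreachable under Pre_
def pvDiff (p : List (List Int)) : Int :=
  |(PySem.List.pyGet? ((PySem.List.pyGet? p 0).getD []) 0).getD 0 -
   (PySem.List.pyGet? ((PySem.List.pyGet? p 1).getD []) 0).getD 0|

def pvLoopA (parejas : List (List (List Int))) (dmin : Option Int) :
    List (List (List Int)) → List (List (List Int))
  | [] => parejas
  | p :: rest =>
    let d := pvDiff p
    if (match dmin with | none => true | some v => decide (v < d)) = true then
      pvLoopA [p] (some d) rest
    else if dmin = some d then
      pvLoopA (parejas ++ [p]) dmin rest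
    else
      pvLoopA parejas dmin rest

def buscar_parejas_menor_valor (vector : List (List (List Int))) : List (List (List Int)) :=
  pvLoopA [] none vector

-- ===== PORT B =====
def buscar_parejas_menor_valor_alt (vector : List (List (List Int))) : List (List (List Int)) :=
  match vector with
  | [] => []
  | p :: rest =>
    let maxima := (rest.map pvDiff).foldl max (pvDiff p)
    vector.filter (fun q => decide (pvDiff q = maxima))

-- ===== PRECONDITION & SPEC =====
-- Pre_ excludes malformed pairs on which Python A raises IndexError (a pareja with fewer than
-- two members, or whose first two members are empty lists); A returns on everything else.
def Pre_buscar_parejas_menor_valor (vector : List (List (List Int))) : Prop :=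
  ∀ p ∈ vector, 2 ≤ p.length ∧ p.getD 0 [] ≠ [] ∧ p.getD 1 [] ≠ []
instance (vector : List (List (List Int))) : Decidable (Pre_buscar_parejas_menor_valor vector) := by
  unfold Pre_buscar_parejas_menor_valor; infer_instance

def pvWitness_buscar_parejas_menor_valor : List (List (List Int)) :=
  [[[0], [3]], [[5], [2]], [[1], [4]]]

def Spec_buscar_parejas_menor_valor (vector : List (List (List Int))) (out : List (List (List Int))) : Prop := out = buscar_parejas_menor_valor_alt vector
instance (vector : List (List (List Int))) (out : List (List (List Int))) : Decidable (Spec_buscar_parejas_menor_valor vector out) := by unfold Spec_buscar_parejas_menor_valor; infer_instance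

-- ===== CLAIM (what is proved, stated in full; the proofs are below) =====
def Claim_equal_buscar_parejas_menor_valor : Prop := ∀ (vector : List (List (List Int))), Dom_buscar_parejas_menor_valor vector → Pre_buscar_parejas_menor_valor vector → Spec_buscar_parejas_menor_valor vector (buscar_parejas_menor_valor vector)

-- ===== LEMMAS AND PROOFS =====

theorem pv_le_foldl_max (l : List Int) (b : Int) : b ≤ l.foldl max b := by
  induction l generalizing b with
  | nil => exact le_refl b
  | cons x t ih => exact le_trans (le_max_left b x) (ih (max b x))

-- characterisation of A's loop once the running maximum is a real value m
theorem pvLoopA_char (rest : List (List (List Int))) :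
    ∀ (acc : List (List (List Int))) (m : Int),
    pvLoopA acc (some m) rest =
      (if (rest.map pvDiff).foldl max m = m then acc else []) ++
        rest.filter (fun q => decide (pvDiff q = (rest.map pvDiff).foldl max m)) := by
  induction rest with
  | nil => intro acc m; simp [pvLoopA]
  | cons p t ih =>
    intro acc m
    by_cases h1 : m < pvDiff p
    · have hM : (t.map pvDiff).foldl max (max m (pvDiff p)) =
          (t.map pvDiff).foldl max (pvDiff p) := by
        rw [max_eq_right (le_of_lt h1)]
      have hMm : ¬ ((t.map pvDiff).foldl max (pvDiff p) = m) := by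
        have := pv_le_foldl_max (t.map pvDiff) (pvDiff p); omega
      simp only [pvLoopA, List.map_cons, List.foldl_cons, h1, decide_true]
      rw [if_pos trivial, ih [p] (pvDiff p)]
      simp only [hM]
      by_cases h2 : (t.map pvDiff).foldl max (pvDiff p) = pvDiff p
      · simp [h2]
        intro hc; omega
      · have h2' : pvDiff p ≠ (t.map pvDiff).foldl max (pvDiff p) := fun hc => h2 hc.symm
        simp [h2, hMm, h2']
    · by_cases h2 : pvDiff p = m
      · subst h2
        simp only [pvLoopA, List.map_cons, List.foldl_cons, max_self, lt_irrefl,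
          decide_false]
        rw [if_neg (by simp), if_pos trivial, ih (acc ++ [p]) (pvDiff p)]
        by_cases h3 : (t.map pvDiff).foldl max (pvDiff p) = pvDiff p
        · simp [h3]
        · have h3' : pvDiff p ≠ (t.map pvDiff).foldl max (pvDiff p) := fun hc => h3 hc.symm
          simp [h3, h3']
      · have h1' : pvDiff p < m := lt_of_le_of_ne (not_lt.mp h1) h2
        have hmax : max m (pvDiff p) = m := max_eq_left (le_of_lt h1')
        have hpne : pvDiff p ≠ (t.map pvDiff).foldl max m := by
          have := pv_le_foldl_max (t.map pvDiff) m; omega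
        simp only [pvLoopA, List.map_cons, List.foldl_cons, hmax, h1, decide_false]
        rw [if_neg (by simp), if_neg (by simp; exact fun hc => h2 hc.symm), ih acc m]
        simp [hpne]

-- ===== VERDICT (by name: the statement is the Claim_ definition above) =====
theorem buscar_parejas_menor_valor_spec : Claim_equal_buscar_parejas_menor_valor := by
  intro vector _ _
  unfold Spec_buscar_parejas_menor_valor
  cases vector with
  | nil => rfl
  | cons p rest =>
    show pvLoopA [] none (p :: rest) = _
    simp only [pvLoopA]
    rw [if_pos trivial, pvLoopA_char rest [p] (pvDiff p)]
    unfold buscar_parejas_menor_valor_alt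
    by_cases h : (rest.map pvDiff).foldl max (pvDiff p) = pvDiff p
    · simp [h]
    · have h' : pvDiff p ≠ (rest.map pvDiff).foldl max (pvDiff p) := fun hc => h hc.symm
      simp [h, h']
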